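-- pv_equiv track=rewrite | github.com/Amit893030/-amit-pptassignment2 | assignment16.py | check_queue
-- ===== SOURCE A (Python) =====
-- from queue import Queue
-- from queue import Queue
--
-- def check_queue(arr):
--     n = len(arr)
--     given_queue = Queue()
--     result_queue = Queue()
--     stack = []
--
--     for num in arr:
--         given_queue.put(num)
--
--     expected = 1
--
--     while not given_queue.empty():
--         front = given_queue.queue[0]
--
--         if front == expected:
--             result_queue.put(front)
--             given_queue.get()
--             expected += 1
--         else:
--             if stack and stack[-1] == expected:
--                 result_queue.put(stack.pop())
--                 expected += 1
--             else:
--                 stack.append(given_queue.get())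
--
--     while stack:
--         if stack.pop() == expected:
--             result_queue.put(expected)
--             expected += 1
--         else:
--             return False
--
--     return True
-- ===== SOURCE B (Python) =====
-- def check_queue(arr):
--     stack = []
--     expected = 1
--     for num in arr:
--         stack.append(num)
--         while stack and stack[-1] == expected:
--             stack.pop()
--             expected += 1
--     return expected == len(arr) + 1
-- ===== Notes on version B (the rewrite author's own statement) =====
-- stated objective: simpler
-- what changed: Replaced A's two thread-safe Queue objects and its two phases (front-peeking main loop with three branches, then a separate stack-draining check loop) by a single uniform pass: push each element, greedily pop while the stack top equals the expected counter, and accept iff expected == len(arr)+1 (constant-factor speedup: no lock-guarded Queue operations).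
import Mathlib
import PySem

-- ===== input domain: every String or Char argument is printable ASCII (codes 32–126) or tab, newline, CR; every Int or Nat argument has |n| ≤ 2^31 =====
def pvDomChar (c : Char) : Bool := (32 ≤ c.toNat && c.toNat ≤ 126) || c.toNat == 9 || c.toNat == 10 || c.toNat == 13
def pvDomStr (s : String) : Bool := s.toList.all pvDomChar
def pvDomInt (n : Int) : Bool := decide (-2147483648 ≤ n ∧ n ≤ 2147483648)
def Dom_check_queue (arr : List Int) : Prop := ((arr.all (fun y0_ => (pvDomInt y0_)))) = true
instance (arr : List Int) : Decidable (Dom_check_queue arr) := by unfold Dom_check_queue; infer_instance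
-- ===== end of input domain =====

-- B replaces A's two Queue objects and separate stack-draining phase by a single
-- push-then-greedy-pop pass over the list with an expected counter (simpler; return value only).

-- ===== PORT A =====
-- the final 'while stack: …' drain loop of A
def pvDrainA : List Int → Int → Bool
  | [], _ => true
  | t :: s, e => if t = e then pvDrainA s (e + 1) else false

-- the main 'while not given_queue.empty(): …' loop of A; stack top = list head
def pvLoopA (q : List Int) (stack : List Int) (e : Int) : Bool :=
  match q with
  | [] => pvDrainA stack e
  | f :: rest =>
    if f = e then pvLoopA rest stack (e + 1)
    else
      match stack with
      | t :: s =>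
        if t = e then pvLoopA (f :: rest) s (e + 1)
        else pvLoopA rest (f :: t :: s) e
      | [] => pvLoopA rest [f] e
termination_by (q.length, stack.length)
decreasing_by all_goals simp_wf; omega

def check_queue (arr : List Int) : Bool := pvLoopA arr [] 1

-- ===== PORT B =====
-- the inner 'while stack and stack[-1] == expected' loop of B
def pvPopB : List Int → Int → List Int × Int
  | t :: s, e => if t = e then pvPopB s (e + 1) else (t :: s, e)
  | [], e => ([], e)

-- one iteration of B's for-loop: push num, then pop greedily
def pvStepB (st : List Int × Int) (num : Int) : List Int × Int :=
  pvPopB (num :: st.1) st.2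

def check_queue_alt (arr : List Int) : Bool :=
  let st := arr.foldl pvStepB ([], 1)
  decide (st.2 = (arr.length : Int) + 1)

-- ===== PRECONDITION & SPEC =====
def Spec_check_queue (arr : List Int) (out : Bool) : Prop := out = check_queue_alt arr
instance (arr : List Int) (out : Bool) : Decidable (Spec_check_queue arr out) := by unfold Spec_check_queue; infer_instance

-- ===== CLAIM (what is proved, stated in full; the proofs are below) =====
def Claim_equal_check_queue : Prop := ∀ (arr : List Int), Dom_check_queue arr → Spec_check_queue arr (check_queue arr)

-- ===== LEMMAS AND PROOFS =====

-- popping preserves expected + stack length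
theorem pvPopB_inv (s : List Int) (e : Int) :
    (pvPopB s e).2 + ((pvPopB s e).1.length : Int) = e + s.length := by
  fun_induction pvPopB s e <;> simp_all <;> omega

theorem pvPopB_ge (s : List Int) (e : Int) : e ≤ (pvPopB s e).2 := by
  fun_induction pvPopB s e <;> simp_all <;> omega

-- the fold preserves expected + stack length, shifted by the consumed elements
theorem foldB_inv (q : List Int) (st : List Int × Int) :
    (q.foldl pvStepB st).2 + ((q.foldl pvStepB st).1.length : Int)
      = st.2 + st.1.length + q.length := by
  induction q generalizing st with
  | nil => simp
  | cons f rest ih =>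
    have h := pvPopB_inv (f :: st.1) st.2
    rw [List.foldl_cons, ih (pvStepB st f)]
    simp only [pvStepB] at *
    simp at h ⊢
    omega

-- A's drain succeeds iff the greedy pop empties the stack
theorem drain_eq (s : List Int) (e : Int) :
    pvDrainA s e = (pvPopB s e).1.isEmpty := by
  fun_induction pvPopB s e <;> simp_all [pvDrainA]

-- an element strictly below expected is never popped
theorem pvPopB_dead (s : List Int) (e x : Int) (hx : x ∈ s) (hlt : x < e) :
    x ∈ (pvPopB s e).1 ∧ x < (pvPopB s e).2 := by
  fun_induction pvPopB s e with
  | case1 s' e' ih =>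
    rcases List.mem_cons.mp hx with h1 | h1
    · omega
    · exact ih h1 (by omega)
  | case2 => exact ⟨hx, hlt⟩
  | case3 => simp_all

theorem foldB_dead (q : List Int) (s : List Int) (e x : Int)
    (hx : x ∈ s) (hlt : x < e) : x ∈ (q.foldl pvStepB (s, e)).1 := by
  induction q generalizing s e with
  | nil => simpa using hx
  | cons f rest ih =>
    have h := pvPopB_dead (f :: s) e x (List.mem_cons_of_mem f hx) hlt
    simp only [List.foldl_cons, pvStepB]
    exact ih _ _ h.1 h.2

-- main bridge: A's loop from any state equals emptiness of B's fold from the normalized state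
theorem loop_eq (q : List Int) (stack : List Int) (e : Int) :
    pvLoopA q stack e = (q.foldl pvStepB (pvPopB stack e)).1.isEmpty := by
  fun_induction pvLoopA q stack e with
  | case1 stack e => simpa using drain_eq stack e
  | case2 stack f rest ih =>
    -- front == expected (named f here): A consumes directly
    rw [ih]
    match stack with
    | [] => simp [pvStepB, pvPopB]
    | t :: s =>
      by_cases ht : t = f
      · -- stack top also equals expected: both sides are dead (contain f below expected)
        subst ht
        have hL : (rest.foldl pvStepB (pvPopB (t :: s) (t + 1))).1 ≠ [] := by
          rw [show pvPopB (t :: s) (t + 1) = (t :: s, t + 1) by simp [pvPopB]]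
          have := foldB_dead rest (t :: s) (t + 1) t (by simp) (by omega)
          intro h; rw [h] at this; simp at this
        have hR : (List.foldl pvStepB (pvStepB (pvPopB (t :: s) t) t) rest).1 ≠ [] := by
          rw [show pvPopB (t :: s) t = pvPopB s (t + 1) by simp [pvPopB]]
          rcases hp : pvPopB s (t + 1) with ⟨s', e'⟩
          have hge : t + 1 ≤ e' := by have := pvPopB_ge s (t + 1); rw [hp] at this; exact this
          rw [show pvStepB (s', e') t = (t :: s', e') by simp [pvStepB, pvPopB]; omega]
          have := foldB_dead rest (t :: s') e' t (by simp) (by omega)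
          intro h; rw [h] at this; simp at this
        rw [Bool.eq_iff_iff]
        simp only [List.isEmpty_iff]
        simp [hL, hR]
      · -- stack top ≠ expected: states coincide
        congr 1
        simp [pvStepB, pvPopB, ht]
  | case3 f rest t s hfe ih =>
    -- front ≠ expected (= t here), stack top == expected: A pops the stack
    rw [ih]
    congr 2
    simp [pvPopB]
  | case4 e f rest hfe t s ht ih =>
    -- front ≠ expected, stack top ≠ expected: A pushes front
    rw [ih]
    congr 1
    simp only [List.foldl_cons, pvStepB]
    rw [show pvPopB (t :: s) e = (t :: s, e) by simp [pvPopB, ht]]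
  | case5 e f rest hfe ih =>
    -- front ≠ expected, stack empty: push
    rw [ih]
    congr 1

-- ===== VERDICT (by name: the statement is the Claim_ definition above) =====
theorem check_queue_spec : Claim_equal_check_queue := by
  intro arr _
  unfold Spec_check_queue check_queue check_queue_alt
  rw [loop_eq]
  have hinv := foldB_inv arr ([], 1)
  rw [show pvPopB [] 1 = ([], 1) from rfl]
  rw [Bool.eq_iff_iff]
  simp only [List.isEmpty_iff, decide_eq_true_iff, ← List.length_eq_zero_iff]
  simp at hinv
  omega
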